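-- pv_equiv track=rewrite | github.com/klark142/Introduction_to_Computer_Science | Zestaw_2/zad7.py | is_multiple
-- ===== SOURCE A (Python) =====
-- def is_multiple(num):
--     n = 1
--     a = 0
--     while a <= num:
--         a = n * n + n + 1
--         if num % a == 0:
--             return True
--         n += 1
--     return False
-- ===== SOURCE B (Python) =====
-- import math
--
--
-- def is_special(x):
--     # x == n*n + n + 1 for some n >= 1  <=>  x >= 3 and 4*x - 3 is a perfect square
--     if x < 3:
--         return False
--     t = 4 * x - 3
--     s = math.isqrt(t)
--     return s * s == t
--
--
-- def is_multiple(num):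
--     if num == 0:
--         return True
--     if num < 0:
--         return False
--     for d in range(1, math.isqrt(num) + 1):
--         if num % d == 0:
--             if is_special(d) or is_special(num // d):
--                 return True
--     return False
-- ===== Notes on version B (the rewrite author's own statement) =====
-- stated objective: alternative
-- what changed: B enumerates divisor pairs (d, num//d) for d up to isqrt(num) and tests each divisor for the special shape via a perfect-square check, instead of A's loop generating the special candidates themselves and testing divisibility; nonpositive inputs are handled up front exactly as A's loop guard decides them.
import Mathlib
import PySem

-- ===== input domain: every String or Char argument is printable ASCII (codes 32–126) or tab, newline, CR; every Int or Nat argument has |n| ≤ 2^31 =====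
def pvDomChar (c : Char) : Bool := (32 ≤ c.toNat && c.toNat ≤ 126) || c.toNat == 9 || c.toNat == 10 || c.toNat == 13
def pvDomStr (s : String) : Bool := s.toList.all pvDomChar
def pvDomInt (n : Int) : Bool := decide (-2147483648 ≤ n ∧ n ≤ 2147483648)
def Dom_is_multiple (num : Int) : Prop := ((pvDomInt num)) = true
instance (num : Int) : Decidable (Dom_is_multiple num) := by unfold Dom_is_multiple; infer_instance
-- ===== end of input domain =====

-- B enumerates the divisors of num up to isqrt(num) (pairing d with num//d) and tests each
-- for the shape n^2+n+1 via a perfect-square check, instead of A's enumeration of the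
-- candidates n^2+n+1 themselves; objective: alternative decomposition, similar cost.

-- ===== PORT A =====
-- A's while loop, ported with an explicit fuel of num.toNat + 2 (the loop leaves
-- the guard a ≤ num after at most num.toNat + 1 iterations, so the fuel is never exhausted).
def is_multiple_loop (num : Int) (fuel : Nat) (n a : Int) : Bool :=
  match fuel with
  | 0 => false
  | fuel + 1 =>
    if a ≤ num then
      let a' := n * n + n + 1
      if PySem.Int.mod num a' == 0 then true
      else is_multiple_loop num fuel (n + 1) a'
    else false

def is_multiple (num : Int) : Bool := is_multiple_loop num (num.toNat + 2) 1 0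

-- ===== PORT B =====
-- math.isqrt t (t ≥ 0 whenever it is reached) is ported by hand as Nat.sqrt t.toNat; exact there.
def is_special (x : Int) : Bool :=
  if x < 3 then false
  else
    let t := 4 * x - 3
    let s : Int := (Nat.sqrt t.toNat : Int)
    s * s == t

def is_multiple_alt (num : Int) : Bool :=
  if num == 0 then true
  else if num < 0 then false
  else
    (PySem.List.pyRange 1 ((Nat.sqrt num.toNat : Int) + 1) 1).any fun d =>
      PySem.Int.mod num d == 0 &&
        (is_special d || is_special (PySem.Int.floordiv num d))

-- ===== PRECONDITION & SPEC =====
def Spec_is_multiple (num : Int) (out : Bool) : Prop := out = is_multiple_alt num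
instance (num : Int) (out : Bool) : Decidable (Spec_is_multiple num out) := by unfold Spec_is_multiple; infer_instance

-- ===== CLAIM (what is proved, stated in full; the proofs are below) =====
def Claim_equal_is_multiple : Prop := ∀ (num : Int), Dom_is_multiple num → Spec_is_multiple num (is_multiple num)

-- ===== LEMMAS AND PROOFS =====

-- is_special recognises exactly the integers of the form n^2 + n + 1 with n ≥ 1.
theorem is_special_iff (x : Int) :
    is_special x = true ↔ ∃ n : Int, 1 ≤ n ∧ x = n * n + n + 1 := by
  unfold is_special
  split_ifs with hx
  · simp only [false_iff]
    rintro ⟨n, hn, rfl⟩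
    nlinarith
  · push_neg at hx
    simp only [beq_iff_eq]
    constructor
    · intro hs
      set sN := Nat.sqrt (4 * x - 3).toNat with hsN
      rcases Nat.even_or_odd sN with ⟨k, hk⟩ | ⟨k, hk⟩
      · exfalso
        rw [hk] at hs
        push_cast at hs
        have hK : ((k : Int) + k) * ((k : Int) + k) = 4 * ((k : Int) * k) := by ring
        omega
      · refine ⟨(k : Int), ?_, ?_⟩
        · rcases Nat.eq_zero_or_pos k with rfl | hk1
          · exfalso; rw [hk] at hs; push_cast at hs; omega
          · exact_mod_cast hk1
        · rw [hk] at hs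
          push_cast at hs
          have hK : (2 * (k : Int) + 1) * (2 * (k : Int) + 1)
              = 4 * ((k : Int) * k) + 4 * (k : Int) + 1 := by ring
          omega
    · rintro ⟨n, hn, rfl⟩
      have ht : (4 * (n * n + n + 1) - 3) = (2 * n + 1) * (2 * n + 1) := by ring
      have h2n : (0:Int) ≤ 2 * n + 1 := by omega
      have hm : ((2 * n + 1).toNat : Int) = 2 * n + 1 := Int.toNat_of_nonneg h2n
      have hMM : (((2 * n + 1).toNat * (2 * n + 1).toNat : Nat) : Int)
          = 4 * (n * n + n + 1) - 3 := by push_cast [hm]; ring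
      have htn : (4 * (n * n + n + 1) - 3).toNat = (2 * n + 1).toNat * (2 * n + 1).toNat := by
        omega
      rw [htn, Nat.sqrt_eq, hm]
      ring

-- A's loop only ever reports genuine divisors of the shape n^2 + n + 1, n ≥ 1.
theorem loop_sound (num : Int) :
    ∀ (fuel : Nat) (n a : Int), 1 ≤ n → is_multiple_loop num fuel n a = true →
      ∃ m : Int, 1 ≤ m ∧ (m * m + m + 1) ∣ num := by
  intro fuel
  induction fuel with
  | zero => intro n a _ h; simp [is_multiple_loop] at h
  | succ f ih =>
    intro n a hn h
    unfold is_multiple_loop at h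
    split_ifs at h with hle
    by_cases hmod : PySem.Int.mod num (n * n + n + 1) == 0
    · refine ⟨n, hn, ?_⟩
      exact (PySem.Int.mod_eq_zero_iff_dvd num (n * n + n + 1)).mp (by simpa using hmod)
    · simp only [hmod] at h
      exact ih (n + 1) (n * n + n + 1) (by omega) h

-- If some n^2 + n + 1 (n ≥ 1) divides num > 0, A's loop finds one (fuel permitting).
theorem loop_complete (num : Int) (hpos : 0 < num) (m : Int) (hdvd : (m * m + m + 1) ∣ num) :
    ∀ (fuel : Nat) (n a : Int), 1 ≤ n → n ≤ m → a ≤ num → (m - n).toNat + 1 ≤ fuel →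
      is_multiple_loop num fuel n a = true := by
  intro fuel
  induction fuel with
  | zero => intro n a _ _ _ hf; omega
  | succ f ih =>
    intro n a hn hnm ha hf
    unfold is_multiple_loop
    rw [if_pos ha]
    by_cases hmod : PySem.Int.mod num (n * n + n + 1) == 0
    · simp [hmod]
    · simp only [hmod]
      have hne : n ≠ m := by
        rintro rfl
        exact hmod (by simp [(PySem.Int.mod_eq_zero_iff_dvd num (n * n + n + 1)).mpr hdvd])
      have hlt : n < m := lt_of_le_of_ne hnm hne
      have hmle : m * m + m + 1 ≤ num := Int.le_of_dvd hpos hdvd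
      have ha' : n * n + n + 1 ≤ num := by nlinarith
      exact ih (n + 1) (n * n + n + 1) (by omega) (by omega) ha' (by omega)

-- Characterisation of A.
theorem is_multiple_iff (num : Int) :
    is_multiple num = true ↔ 0 ≤ num ∧ ∃ m : Int, 1 ≤ m ∧ (m * m + m + 1) ∣ num := by
  constructor
  · intro h
    have h0 : 0 ≤ num := by
      by_contra h0
      push_neg at h0
      unfold is_multiple is_multiple_loop at h
      rw [if_neg (by omega)] at h
      exact absurd h (by simp)
    exact ⟨h0, loop_sound num _ 1 0 le_rfl h⟩
  · rintro ⟨h0, m, hm, hdvd⟩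
    rcases eq_or_lt_of_le h0 with rfl | hpos
    · decide
    · have hmle : m * m + m + 1 ≤ num := Int.le_of_dvd hpos hdvd
      have hmnum : m ≤ num := by nlinarith
      exact loop_complete num hpos m hdvd (num.toNat + 2) 1 0 le_rfl hm (by omega) (by omega)

-- Characterisation of B.
theorem is_multiple_alt_iff (num : Int) :
    is_multiple_alt num = true ↔ 0 ≤ num ∧ ∃ m : Int, 1 ≤ m ∧ (m * m + m + 1) ∣ num := by
  by_cases h0 : num = 0
  · subst h0
    rw [show is_multiple_alt 0 = true from by decide]
    simp only [true_iff]
    exact ⟨le_rfl, 1, le_rfl, ⟨0, by ring⟩⟩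
  · unfold is_multiple_alt
    rw [if_neg (show ¬ ((num == 0) = true) by simpa using h0)]
    by_cases hneg : num < 0
    · rw [if_pos hneg]
      constructor
      · intro h; simp at h
      · rintro ⟨h, -⟩; omega
    · push_neg at hneg
      have hpos : 0 < num := lt_of_le_of_ne hneg (Ne.symm h0)
      rw [if_neg (by omega)]
      set K : Int := (Nat.sqrt num.toNat : Int) with hK
      have hKnn : 0 ≤ K := by positivity
      have hKub : num < (K + 1) * (K + 1) := by
        have h1 : num.toNat < (Nat.sqrt num.toNat + 1) * (Nat.sqrt num.toNat + 1) :=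
          Nat.lt_succ_sqrt num.toNat
        zify at h1
        rw [Int.toNat_of_nonneg hneg] at h1
        rw [← hK] at h1
        exact h1
      rw [List.any_eq_true]
      constructor
      · rintro ⟨d, hdmem, hdp⟩
        rw [PySem.List.mem_pyRange_one] at hdmem
        obtain ⟨hd1, hdK⟩ := hdmem
        simp only [Bool.and_eq_true, Bool.or_eq_true, beq_iff_eq] at hdp
        obtain ⟨hmod, hsp⟩ := hdp
        have hdvd : d ∣ num := (PySem.Int.mod_eq_zero_iff_dvd num d).mp hmod
        refine ⟨hneg, ?_⟩
        rcases hsp with hsp | hsp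
        · obtain ⟨n, hn, rfl⟩ := (is_special_iff d).mp hsp
          exact ⟨n, hn, hdvd⟩
        · obtain ⟨c, hc⟩ := hdvd
          have hd0 : d ≠ 0 := by omega
          have hfd : PySem.Int.floordiv num d = c := by
            rw [PySem.Int.floordiv_eq_ediv_of_pos (by omega), hc,
              Int.mul_ediv_cancel_left c hd0]
          rw [hfd] at hsp
          obtain ⟨n, hn, rfl⟩ := (is_special_iff c).mp hsp
          exact ⟨n, hn, ⟨d, by rw [hc]; ring⟩⟩
      · rintro ⟨-, m, hm, hdvd⟩
        have hq3 : 3 ≤ m * m + m + 1 := by nlinarith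
        obtain ⟨c, hc⟩ := hdvd
        set q : Int := m * m + m + 1 with hqdef
        have hq0 : 0 < q := by omega
        have hc0 : 0 < c := by nlinarith
        have hspq : is_special q = true := (is_special_iff q).mpr ⟨m, hm, rfl⟩
        by_cases hqK : q ≤ K
        · refine ⟨q, ?_, ?_⟩
          · rw [PySem.List.mem_pyRange_one]; omega
          · simp only [Bool.and_eq_true, Bool.or_eq_true, beq_iff_eq]
            exact ⟨(PySem.Int.mod_eq_zero_iff_dvd num q).mpr ⟨c, hc⟩, Or.inl hspq⟩
        · push_neg at hqK
          have hcK : c ≤ K := by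
            by_contra hcK
            push_neg at hcK
            have h2 : (K + 1) * (K + 1) ≤ q * c :=
              mul_le_mul (by omega) (by omega) (by omega) (le_of_lt hq0)
            linarith
          refine ⟨c, ?_, ?_⟩
          · rw [PySem.List.mem_pyRange_one]; omega
          · have hcdvd : c ∣ num := ⟨q, by rw [hc]; ring⟩
            have hfc : PySem.Int.floordiv num c = q := by
              rw [PySem.Int.floordiv_eq_ediv_of_pos hc0, hc, mul_comm,
                Int.mul_ediv_cancel_left q (by omega)]
            simp only [Bool.and_eq_true, Bool.or_eq_true, beq_iff_eq]
            exact ⟨(PySem.Int.mod_eq_zero_iff_dvd num c).mpr hcdvd,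
              Or.inr (by rw [hfc]; exact hspq)⟩

-- ===== VERDICT (by name: the statement is the Claim_ definition above) =====
theorem is_multiple_spec : Claim_equal_is_multiple := by
  intro num _
  unfold Spec_is_multiple
  exact Bool.eq_iff_iff.mpr ((is_multiple_iff num).trans (is_multiple_alt_iff num).symm)
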